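-- pv_equiv track=rewrite | github.com/cazares/mixterioso | scripts/0_master.py | parse_steps_string
-- ===== SOURCE A (Python) =====
-- def parse_steps_string(s: str) -> list[int]:
--     steps: list[int] = []
--     for ch in s:
--         if ch in "012345":
--             val = int(ch)
--             if val not in steps:
--                 steps.append(val)
--     steps.sort()
--     return steps
-- ===== SOURCE B (Python) =====
-- def parse_steps_string(s: str) -> list[int]:
--     return [d for d in range(6) if str(d) in s]
-- ===== Notes on version B (the rewrite author's own statement) =====
-- stated objective: faster
-- what changed: Instead of scanning s char by char, deduping into a list and sorting, B enumerates the fixed ordered candidate digits 0..5 and keeps those whose character occurs in s, so no dedup list and no sort are needed.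
import Mathlib
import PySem

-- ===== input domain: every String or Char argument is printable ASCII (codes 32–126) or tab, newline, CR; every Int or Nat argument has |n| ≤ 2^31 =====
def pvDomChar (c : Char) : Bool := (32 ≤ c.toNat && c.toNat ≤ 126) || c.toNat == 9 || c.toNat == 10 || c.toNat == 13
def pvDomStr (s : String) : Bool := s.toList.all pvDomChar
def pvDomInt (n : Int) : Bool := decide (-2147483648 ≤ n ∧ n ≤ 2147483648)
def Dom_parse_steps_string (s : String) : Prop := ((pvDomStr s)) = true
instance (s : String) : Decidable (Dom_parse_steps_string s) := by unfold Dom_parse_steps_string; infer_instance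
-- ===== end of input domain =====

-- B enumerates the fixed ordered candidate digits 0..5 and tests each for occurrence in s,
-- instead of A's scan-dedup-sort; same return value, exact equivalence.


-- ===== PORT A =====
-- 'for ch in s: if ch in "012345": val = int(ch); if val not in steps: steps.append(val)'; then steps.sort().
-- int(ch) is PySem.Int.ofStr? on the one-char string; the 'none' branch is unreachable there (ch is a digit).
def parse_steps_string (s : String) : List Int :=
  let steps : List Int :=
    s.toList.foldl (fun steps ch =>
      if PySem.Str.isIn (String.ofList [ch]) "012345" then
        match PySem.Int.ofStr? (String.ofList [ch]) with
        | some val => if val ∉ steps then steps ++ [val] else steps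
        | none => steps
      else steps) []
  PySem.List.sorted steps (fun x => x) false

-- ===== PORT B =====
-- '[d for d in range(6) if str(d) in s]'
def parse_steps_string_alt (s : String) : List Int :=
  ([0, 1, 2, 3, 4, 5] : List Int).filter (fun d => PySem.Str.isIn (PySem.Int.toStr d) s)

-- ===== PRECONDITION & SPEC =====
def Spec_parse_steps_string (s : String) (out : List Int) : Prop := out = parse_steps_string_alt s
instance (s : String) (out : List Int) : Decidable (Spec_parse_steps_string s out) := by unfold Spec_parse_steps_string; infer_instance

-- ===== CLAIM (what is proved, stated in full; the proofs are below) =====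
def Claim_equal_parse_steps_string : Prop := ∀ (s : String), Dom_parse_steps_string s → Spec_parse_steps_string s (parse_steps_string s)

-- ===== LEMMAS AND PROOFS =====

-- the six digit characters A filters on
def pvDigits : List Char := ['0', '1', '2', '3', '4', '5']

-- abstract value function of A's loop body: the digit value of ch, none if ch is not one of "012345"
def pvHfun (ch : Char) : Option Int :=
  if ch ∈ pvDigits then some ((ch.toNat : Int) - 48) else none

def pvStep (steps : List Int) (ch : Char) : List Int :=
  match pvHfun ch with
  | some val => if val ∉ steps then steps ++ [val] else steps
  | none => steps

def pvChr (v : Int) : Char := Char.ofNat (48 + v.toNat)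

set_option maxRecDepth 100000 in
lemma ofStr_digit : ∀ d ∈ pvDigits, PySem.Int.ofStr? (String.ofList [d]) = some ((d.toNat : Int) - 48) := by
  intro d hd
  fin_cases hd <;> decide

lemma val_mem_digit : ∀ d ∈ pvDigits, ((d.toNat : Int) - 48) ∈ ([0, 1, 2, 3, 4, 5] : List Int) := by
  intro d hd
  fin_cases hd <;> decide

set_option maxRecDepth 100000 in
lemma toStr_digit : ∀ d ∈ pvDigits, (PySem.Int.toStr ((d.toNat : Int) - 48)).toList = [d] := by
  intro d hd
  fin_cases hd <;> decide

set_option maxRecDepth 100000 in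
lemma toStr_chr : ∀ v ∈ ([0, 1, 2, 3, 4, 5] : List Int), (PySem.Int.toStr v).toList = [pvChr v] := by
  intro d hd
  fin_cases hd <;> decide

set_option maxRecDepth 100000 in
lemma pvHfun_chr : ∀ v ∈ ([0, 1, 2, 3, 4, 5] : List Int), pvHfun (pvChr v) = some v := by
  intro d hd
  fin_cases hd <;> decide

lemma singleton_infix_iff_mem {α : Type} (a : α) (l : List α) : [a] <:+: l ↔ a ∈ l := by
  constructor
  · intro h
    exact (List.singleton_sublist).1 h.sublist
  · intro h
    obtain ⟨s, t, rfl⟩ := List.append_of_mem h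
    exact ⟨s, t, by simp⟩

lemma isIn_single_digits (ch : Char) :
    PySem.Str.isIn (String.ofList [ch]) "012345" = decide (ch ∈ pvDigits) := by
  have hdig : ("012345" : String).toList = pvDigits := by decide
  by_cases h : ch ∈ pvDigits
  · simp only [h, decide_true]
    rw [PySem.Str.isIn_iff_infix, String.toList_ofList, hdig]
    exact (singleton_infix_iff_mem ch _).2 h
  · simp only [h, decide_false]
    rw [← Bool.not_eq_true, PySem.Str.isIn_iff_infix, String.toList_ofList, hdig]
    intro hinf
    exact h ((singleton_infix_iff_mem ch _).1 hinf)

lemma stepA_eq_pvStep (steps : List Int) (ch : Char) :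
    (if PySem.Str.isIn (String.ofList [ch]) "012345" then
        match PySem.Int.ofStr? (String.ofList [ch]) with
        | some val => if val ∉ steps then steps ++ [val] else steps
        | none => steps
      else steps) = pvStep steps ch := by
  rw [isIn_single_digits]
  by_cases h : ch ∈ pvDigits
  · simp only [h, decide_true, if_true, pvStep, pvHfun, ofStr_digit ch h]
  · simp [h, pvStep, pvHfun]

lemma mem_pvStep (acc : List Int) (ch : Char) (v : Int) :
    v ∈ pvStep acc ch ↔ v ∈ acc ∨ pvHfun ch = some v := by
  unfold pvStep
  cases h : pvHfun ch with
  | none => simp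
  | some w =>
    by_cases hw : w ∈ acc
    · simp only [hw, not_true_eq_false, if_false, Option.some.injEq]
      constructor
      · exact Or.inl
      · rintro (hv | rfl)
        · exact hv
        · exact hw
    · simp only [hw, not_false_eq_true, if_true, List.mem_append, List.mem_singleton,
        Option.some.injEq]
      exact or_congr Iff.rfl ⟨fun h => h.symm, fun h => h.symm⟩

lemma mem_foldl_pvStep (t : List Char) (acc : List Int) (v : Int) :
    v ∈ t.foldl pvStep acc ↔ v ∈ acc ∨ ∃ ch ∈ t, pvHfun ch = some v := by
  induction t generalizing acc with
  | nil => simp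
  | cons ch t ih =>
    rw [List.foldl_cons, ih, mem_pvStep]
    constructor
    · rintro ((hv | hv) | ⟨c, hc, hcv⟩)
      · exact Or.inl hv
      · exact Or.inr ⟨ch, List.mem_cons_self, hv⟩
      · exact Or.inr ⟨c, List.mem_cons_of_mem ch hc, hcv⟩
    · rintro (hv | ⟨c, hc, hcv⟩)
      · exact Or.inl (Or.inl hv)
      · rcases List.mem_cons.1 hc with rfl | hc
        · exact Or.inl (Or.inr hcv)
        · exact Or.inr ⟨c, hc, hcv⟩

lemma nodup_foldl_pvStep (t : List Char) (acc : List Int) (h : acc.Nodup) :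
    (t.foldl pvStep acc).Nodup := by
  induction t generalizing acc with
  | nil => simpa
  | cons ch t ih =>
    apply ih
    unfold pvStep
    cases pvHfun ch with
    | none => exact h
    | some w =>
      by_cases hw : w ∈ acc
      · simp only [hw, not_true_eq_false, if_false]
        exact h
      · simp only [hw, not_false_eq_true, if_true]
        refine (List.nodup_append).2 ⟨h, List.nodup_singleton w, ?_⟩
        intro a ha b hb
        rw [List.mem_singleton] at hb
        subst hb
        exact fun heq => hw (heq ▸ ha)

lemma exists_pvHfun_iff (t : List Char) (v : Int) :
    (∃ ch ∈ t, pvHfun ch = some v) ↔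
      v ∈ ([0, 1, 2, 3, 4, 5] : List Int) ∧ (PySem.Int.toStr v).toList <:+: t := by
  constructor
  · rintro ⟨ch, hch, h⟩
    have hc : ch ∈ pvDigits := by
      by_contra hc
      rw [pvHfun, if_neg hc] at h
      simp at h
    rw [pvHfun, if_pos hc, Option.some_inj] at h
    subst h
    refine ⟨val_mem_digit ch hc, ?_⟩
    rw [toStr_digit ch hc]
    exact (singleton_infix_iff_mem ch t).2 hch
  · rintro ⟨hv, hinf⟩
    rw [toStr_chr v hv] at hinf
    exact ⟨pvChr v, (singleton_infix_iff_mem _ t).1 hinf, pvHfun_chr v hv⟩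

-- ===== VERDICT (by name: the statement is the Claim_ definition above) =====
theorem parse_steps_string_spec : Claim_equal_parse_steps_string := by
  intro s _
  show parse_steps_string s = parse_steps_string_alt s
  have hf : (fun (steps : List Int) (ch : Char) =>
      if PySem.Str.isIn (String.ofList [ch]) "012345" then
        match PySem.Int.ofStr? (String.ofList [ch]) with
        | some val => if val ∉ steps then steps ++ [val] else steps
        | none => steps
      else steps) = pvStep := by
    funext steps ch
    exact stepA_eq_pvStep steps ch
  rw [parse_steps_string, parse_steps_string_alt, hf]
  apply PySem.List.sorted_eq_of_perm_of_pairwise_lt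
  · refine (List.perm_ext_iff_of_nodup ?_ ?_).2 ?_
    · exact (by decide : ([0, 1, 2, 3, 4, 5] : List Int).Nodup).filter _
    · exact nodup_foldl_pvStep _ _ (by simp)
    · intro v
      rw [List.mem_filter, mem_foldl_pvStep, exists_pvHfun_iff]
      simp only [List.not_mem_nil, false_or]
      exact and_congr Iff.rfl (PySem.Str.isIn_iff_infix _ _)
  · exact List.Pairwise.sublist List.filter_sublist
      (by decide : ([0, 1, 2, 3, 4, 5] : List Int).Pairwise (· < ·))
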